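-- pv_equiv track=rewrite | github.com/rin-gil/youtube-music-download-bot | tgbot/services/formatter.py | remove_unwanted_chars
-- ===== SOURCE A (Python) =====
-- def remove_unwanted_chars(string: str) -> str:
--     """Removes everything from the string except letters, numbers, spaces, hyphens, and underscores"""
--     processed_string: str = ""
--     for char in string[:100]:
--         if char.isalnum() or char == "-" or char == "_":
--             processed_string += char
--         elif char.isspace() and (not processed_string or not processed_string[-1].isspace()):
--             processed_string += char
--     return processed_string
-- ===== SOURCE B (Python) =====
-- def remove_unwanted_chars(string: str) -> str:
--     """Removes everything from the string except letters, numbers, spaces, hyphens, and underscores"""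
--     # Phase 1: keep only allowed chars (letters/digits/-/_/whitespace) of the first 100.
--     filtered = [c for c in string[:100] if c.isalnum() or c in "-_" or c.isspace()]
--     # Phase 2: collapse each whitespace run to its first char.
--     out = []
--     i = 0
--     n = len(filtered)
--     while i < n:
--         c = filtered[i]
--         out.append(c)
--         i += 1
--         if c.isspace():
--             while i < n and filtered[i].isspace():
--                 i += 1
--     return "".join(out)
-- ===== Notes on version B (the rewrite author's own statement) =====
-- stated objective: alternative
-- what changed: Replaces A's single accumulator loop that inspects the last appended char with a two-phase pipeline: filter the first 100 chars to the allowed alphabet, then collapse each whitespace run to its first character in one scan.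
import Mathlib
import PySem

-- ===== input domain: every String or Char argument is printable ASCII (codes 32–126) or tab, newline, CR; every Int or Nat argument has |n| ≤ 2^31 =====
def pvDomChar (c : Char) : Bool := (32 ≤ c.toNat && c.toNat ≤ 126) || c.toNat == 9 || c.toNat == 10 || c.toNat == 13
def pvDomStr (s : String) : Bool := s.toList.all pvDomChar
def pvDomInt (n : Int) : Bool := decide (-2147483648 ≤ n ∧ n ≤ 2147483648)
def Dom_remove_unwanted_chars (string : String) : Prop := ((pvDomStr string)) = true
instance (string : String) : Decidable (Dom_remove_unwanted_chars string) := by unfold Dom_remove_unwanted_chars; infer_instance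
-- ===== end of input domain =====

-- B replaces A's accumulator loop (which inspects the last appended char) by a
-- two-phase pipeline: filter the first 100 chars to the allowed alphabet, then
-- collapse each whitespace run to its first character; alternative decomposition, same result.


-- ===== PORT A =====
-- 'not processed_string or not processed_string[-1].isspace()' as one helper:
-- pvLastSpace acc = false exactly when acc is empty or its last char is not whitespace.
def pvLastSpace (acc : List Char) : Bool :=
  match acc.getLast? with
  | some d => PySem.Chars.isspace d
  | none => false

def pvStepA (acc : List Char) (c : Char) : List Char :=
  if PySem.Chars.isalnum c || c == '-' || c == '_' then acc ++ [c]
  else if PySem.Chars.isspace c && !pvLastSpace acc then acc ++ [c]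
  else acc

def remove_unwanted_chars (string : String) : String :=
  String.ofList ((PySem.List.slice string.toList none (some 100)).foldl pvStepA [])

-- ===== PORT B =====
def pvAllowedB (c : Char) : Bool :=
  PySem.Chars.isalnum c || c == '-' || c == '_' || PySem.Chars.isspace c

-- the collapse scan of Source B: emit c; if c is whitespace, skip the rest of its run
def pvCollapse : List Char → List Char
  | [] => []
  | c :: rest =>
    if PySem.Chars.isspace c then c :: pvCollapse (rest.dropWhile PySem.Chars.isspace)
    else c :: pvCollapse rest
termination_by l => l.length
decreasing_by
  · exact Nat.lt_succ_of_le (List.length_dropWhile_le _ _)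
  · simp

def remove_unwanted_chars_alt (string : String) : String :=
  String.ofList (pvCollapse ((string.toList.take 100).filter pvAllowedB))

-- ===== PRECONDITION & SPEC =====
def Spec_remove_unwanted_chars (string : String) (out : String) : Prop := out = remove_unwanted_chars_alt string
instance (string : String) (out : String) : Decidable (Spec_remove_unwanted_chars string out) := by unfold Spec_remove_unwanted_chars; infer_instance

-- ===== CLAIM (what is proved, stated in full; the proofs are below) =====
def Claim_equal_remove_unwanted_chars : Prop := ∀ (string : String), Dom_remove_unwanted_chars string → Spec_remove_unwanted_chars string (remove_unwanted_chars string)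

-- ===== LEMMAS AND PROOFS =====

-- whitespace chars are never alnum nor '-' nor '_' (true of the PySem tables for all Char)
theorem pv_space_not_allowed (c : Char) (h : PySem.Chars.isspace c = true) :
    (PySem.Chars.isalnum c || c == '-' || c == '_') = false := by
  simp [PySem.Chars.isspace] at h
  simp [PySem.Chars.isalnum, PySem.Chars.isalpha, PySem.Chars.isdigit,
    PySem.Chars.isupper, PySem.Chars.islower, Char.le_def, UInt32.le_iff_toNat_le,
    Char.ext_iff, UInt32.ext_iff, not_le, Char.toNat_val]
  omega

theorem pvLastSpace_concat (acc : List Char) (c : Char) :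
    pvLastSpace (acc ++ [c]) = PySem.Chars.isspace c := by
  simp [pvLastSpace]

-- loop invariant: A's fold from any accumulator equals the accumulator followed by
-- B's collapse of the filtered remainder, in skip-mode iff the accumulator ends in whitespace
theorem pv_fold_eq (l : List Char) : ∀ (acc : List Char),
    l.foldl pvStepA acc =
      acc ++ (if pvLastSpace acc
              then pvCollapse ((l.filter pvAllowedB).dropWhile PySem.Chars.isspace)
              else pvCollapse (l.filter pvAllowedB)) := by
  induction l with
  | nil => intro acc; simp [pvCollapse]
  | cons c l ih =>
    intro acc
    by_cases hs : PySem.Chars.isspace c = true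
    · have ha := pv_space_not_allowed c hs
      have hb : pvAllowedB c = true := by simp [pvAllowedB, hs]
      by_cases hl : pvLastSpace acc = true
      · have hstep : pvStepA acc c = acc := by
          simp [pvStepA, ha, hs, hl]
        rw [List.foldl_cons, hstep, ih acc]
        simp [hl, hb, hs]
      · have hl' : pvLastSpace acc = false := by simpa using hl
        have hstep : pvStepA acc c = acc ++ [c] := by
          simp [pvStepA, ha, hs, hl']
        rw [List.foldl_cons, hstep, ih (acc ++ [c])]
        simp [hl', pvLastSpace_concat, hs, hb, pvCollapse, List.append_assoc]
    · have hs' : PySem.Chars.isspace c = false := by simpa using hs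
      by_cases ha : (PySem.Chars.isalnum c || c == '-' || c == '_') = true
      · have hb : pvAllowedB c = true := by
          simp only [Bool.or_eq_true, beq_iff_eq] at ha
          simp only [pvAllowedB, Bool.or_eq_true, beq_iff_eq]
          tauto
        have hstep : pvStepA acc c = acc ++ [c] := by
          simp [pvStepA, ha]
        rw [List.foldl_cons, hstep, ih (acc ++ [c])]
        have hcol : ∀ f, pvCollapse (c :: f) = c :: pvCollapse f := by
          intro f; simp [pvCollapse, hs']
        by_cases hl : pvLastSpace acc = true <;>
          simp [hl, pvLastSpace_concat, hs', hb, hcol, List.append_assoc]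
      · have ha' : (PySem.Chars.isalnum c || c == '-' || c == '_') = false := by
          simpa using ha
        have hb : pvAllowedB c = false := by
          simp only [pvAllowedB, Bool.or_assoc, Bool.or_eq_false_iff] at *
          simp [ha'.1, ha'.2, hs']
        have hstep : pvStepA acc c = acc := by
          simp [pvStepA, ha', hs']
        rw [List.foldl_cons, hstep, ih acc]
        simp [hb]

-- ===== VERDICT (by name: the statement is the Claim_ definition above) =====
theorem remove_unwanted_chars_spec : Claim_equal_remove_unwanted_chars := by
  intro s _
  unfold Spec_remove_unwanted_chars remove_unwanted_chars remove_unwanted_chars_alt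
  rw [show (100:Int) = ((100:Nat):Int) from rfl, PySem.List.slice_to_natCast]
  rw [pv_fold_eq]
  simp [pvLastSpace]
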